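-- pv_equiv track=rewrite | github.com/ymnseol/problem-solving | programmers/42578-위장/42578_위장.py | solution
-- ===== SOURCE A (Python) =====
-- from functools import reduce
--
-- def solution(clothes):
--     op = dict()
--     for _, t in clothes:
--         try:
--             op[t] += 1
--         except:
--             op[t] = 1
--
--     return reduce(lambda x, y: x * y, [v + 1 for _, v in op.items()]) - 1
-- ===== SOURCE B (Python) =====
-- def solution(clothes):
--     # Partition loop: repeatedly take the type of the first remaining item,
--     # multiply in (its multiplicity + 1), and drop all items of that type.
--     rest = list(clothes)
--     prod = 1
--     while rest:
--         t = rest[0][1]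
--         prod *= sum(1 for p in rest if p[1] == t) + 1
--         rest = [p for p in rest if p[1] != t]
--     return prod - 1
-- ===== Notes on version B (the rewrite author's own statement) =====
-- stated objective: alternative
-- what changed: Replaces A's hash-map counting pass plus reduce over dict items with a dict-free partition loop that repeatedly counts and removes all items of the first remaining type, multiplying the factors as it goes.
-- outside the precondition, e.g. on solution([]): A raises TypeError, B returns 0
-- crash fix: On the empty list A raises TypeError (reduce over an empty sequence with no initial value); B returns 0. — e.g. on solution([]): A raises TypeError, B returns 0
import Mathlib
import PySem

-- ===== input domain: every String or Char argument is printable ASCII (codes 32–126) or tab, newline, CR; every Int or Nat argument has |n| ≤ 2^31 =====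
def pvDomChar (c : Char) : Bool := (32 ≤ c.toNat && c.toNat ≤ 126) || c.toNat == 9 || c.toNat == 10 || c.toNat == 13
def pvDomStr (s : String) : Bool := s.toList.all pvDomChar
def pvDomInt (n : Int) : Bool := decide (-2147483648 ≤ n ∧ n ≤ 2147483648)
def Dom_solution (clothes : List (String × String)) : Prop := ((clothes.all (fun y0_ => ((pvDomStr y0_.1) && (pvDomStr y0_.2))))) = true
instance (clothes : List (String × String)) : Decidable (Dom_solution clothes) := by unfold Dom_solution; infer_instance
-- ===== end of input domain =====

-- B replaces A's hash-map counting pass + reduce over dict items by a dict-free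
-- partition loop (count and remove the first remaining type, multiply the factors);
-- same return value on every non-empty list (A raises TypeError on the empty list).

-- ===== PORT A =====
-- reduce(lambda x, y: x * y, l): first element is the accumulator, foldl over the rest;
-- on [] Python's reduce raises TypeError (excluded by Pre_solution; the 0 is unreachable there)
def pyReduceMul (l : List Int) : Int :=
  match l with
  | [] => 0
  | x :: rest => rest.foldl (· * ·) x

-- 'try: op[t] += 1 / except: op[t] = 1' is exactly op[t] = op.get(t, 0) + 1, i.e. Dict.modify t 0 (· + 1)
def solution (clothes : List (String × String)) : Int :=
  let op := clothes.foldl (fun d p => d.modify p.2 0 (· + 1)) (PySem.Dict.empty : PySem.Dict String Int)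
  pyReduceMul (op.items.map (fun kv => kv.2 + 1)) - 1

-- ===== PORT B =====
-- the 'while rest:' loop of Source B: count the first remaining type, multiply, drop its items
def bLoop (rest : List (String × String)) : Int :=
  match rest with
  | [] => 1
  | p :: tail =>
    (((p :: tail).countP (fun q => q.2 == p.2) : Int) + 1) *
      bLoop ((p :: tail).filter (fun q => q.2 != p.2))
termination_by rest.length
decreasing_by
  simp only [List.filter_cons, bne_self_eq_false, List.length_cons]
  exact Nat.lt_succ_of_le (List.length_filter_le _ _)

def solution_alt (clothes : List (String × String)) : Int :=
  bLoop clothes - 1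

-- ===== PRECONDITION & SPEC =====
-- Pre_ excludes only the empty list, on which A's reduce raises TypeError.
def Pre_solution (clothes : List (String × String)) : Prop := clothes ≠ []
instance (clothes : List (String × String)) : Decidable (Pre_solution clothes) := by unfold Pre_solution; infer_instance
def pvWitness_solution : (List (String × String)) := [("a", "hat"), ("b", "hat"), ("c", "coat")]

-- On the empty list A raises TypeError (reduce over an empty iterable with no initial value); B returns 0.
def Raises_solution (clothes : List (String × String)) : Prop := clothes = []
instance (clothes : List (String × String)) : Decidable (Raises_solution clothes) := by unfold Raises_solution; infer_instance
def pvRaiseWitness_solution : (List (String × String)) := []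
def pvRaiseWitnessOut_solution : Int := 0

def Spec_solution (clothes : List (String × String)) (out : Int) : Prop := out = solution_alt clothes
instance (clothes : List (String × String)) (out : Int) : Decidable (Spec_solution clothes out) := by unfold Spec_solution; infer_instance

-- ===== CLAIM (what is proved, stated in full; the proofs are below) =====
def Claim_equal_solution : Prop := ∀ (clothes : List (String × String)), Dom_solution clothes → Pre_solution clothes → Spec_solution clothes (solution clothes)
def Claim_raises_solution : Prop := (∀ (clothes : List (String × String)), Dom_solution clothes → Raises_solution clothes → ¬ Pre_solution clothes) ∧ (Dom_solution (pvRaiseWitness_solution) ∧ Raises_solution (pvRaiseWitness_solution) ∧ solution_alt (pvRaiseWitness_solution) = pvRaiseWitnessOut_solution)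

-- ===== LEMMAS AND PROOFS =====

-- first-occurrence dedup (PySem.Set.ofList) commutes with filter
lemma ofList_filter_comm {α : Type} [BEq α] [LawfulBEq α] (p : α → Bool) :
    ∀ (l : List α), PySem.Set.ofList (l.filter p) = (PySem.Set.ofList l).filter p := by
  intro l
  induction l with
  | nil => simp [PySem.Set.ofList_nil]
  | cons a l ih =>
    rw [PySem.Set.ofList_cons]
    by_cases hp : p a = true
    · rw [List.filter_cons_of_pos hp, PySem.Set.ofList_cons, List.filter_cons_of_pos hp]
      simp only [PySem.Set.discard, ih, List.filter_filter]
      congr 1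
      apply List.filter_congr; intro x _; rw [Bool.and_comm]
    · rw [List.filter_cons_of_neg hp, ih]
      simp only [PySem.Set.discard]
      rw [List.filter_cons_of_neg hp, List.filter_filter]
      apply List.filter_congr; intro x _
      by_cases hx : x = a
      · subst hx
        simp only [Bool.not_eq_true] at hp
        simp [hp]
      · simp [hx]

-- B's partition loop computes the product over the distinct types of (multiplicity + 1)
lemma bLoop_eq_prod (n : ℕ) : ∀ (clothes : List (String × String)), clothes.length ≤ n →
    bLoop clothes =
      ((PySem.Set.ofList (clothes.map (·.2))).map
        (fun k => ((clothes.map (·.2)).count k : Int) + 1)).prod := by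
  induction n with
  | zero =>
    intro clothes h
    have : clothes = [] := List.eq_nil_of_length_eq_zero (Nat.le_zero.mp h)
    subst this
    simp [bLoop, PySem.Set.ofList_nil]
  | succ n ih =>
    intro clothes h
    match clothes with
    | [] => simp [bLoop, PySem.Set.ofList_nil]
    | p :: tail =>
      rw [bLoop]
      have hf : (p :: tail).filter (fun q => q.2 != p.2) = tail.filter (fun q => q.2 != p.2) := by
        simp
      rw [hf]
      have hlen : (tail.filter (fun q => q.2 != p.2)).length ≤ n :=
        le_trans (List.length_filter_le _ _) (Nat.succ_le_succ_iff.mp h)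
      rw [ih _ hlen]
      have hmapf : (tail.filter (fun q => q.2 != p.2)).map (·.2)
          = (tail.map (·.2)).filter (fun y => y != p.2) := by
        simp [List.filter_map, Function.comp_def]
      rw [List.map_cons, PySem.Set.ofList_cons]
      simp only [PySem.Set.discard]
      rw [List.map_cons, List.prod_cons]
      congr 1
      · simp [List.count, List.countP_map, Function.comp_def, BEq.comm]
      · rw [hmapf, ofList_filter_comm]
        apply congrArg
        apply List.map_congr_left
        intro k hk
        simp only [List.mem_filter, bne_iff_ne, ne_eq] at hk
        obtain ⟨hk1, hk2⟩ := hk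
        rw [List.count_cons, List.count_filter (by simp [hk2])]
        simp [Ne.symm hk2]

lemma foldl_mul_eq_prod (rest : List Int) : ∀ x : Int, rest.foldl (· * ·) x = x * rest.prod := by
  induction rest with
  | nil => intro x; simp
  | cons a l ih => intro x; simp [List.foldl_cons, ih, List.prod_cons, mul_assoc]

-- reduce(mul, l) = product of l, for non-empty l
lemma pyReduceMul_eq_prod (x : Int) (rest : List Int) :
    pyReduceMul (x :: rest) = (x :: rest).prod := by
  simp [pyReduceMul, foldl_mul_eq_prod]

-- ===== VERDICT (by name: the statement is the Claim_ definition above) =====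
theorem solution_spec : Claim_equal_solution := by
  intro clothes _ hpre
  unfold Spec_solution
  obtain ⟨p, tail, rfl⟩ := List.exists_cons_of_ne_nil hpre
  have hop : (p :: tail).foldl (fun d q => d.modify q.2 0 (· + 1)) (PySem.Dict.empty : PySem.Dict String Int)
      = PySem.Dict.counter ((p :: tail).map (·.2)) := by
    rw [PySem.Dict.counter_eq_foldl, List.foldl_map]
  have hmap : ((PySem.Dict.counter ((p :: tail).map (·.2))).items.map (fun kv => kv.2 + 1))
      = (PySem.Set.ofList ((p :: tail).map (·.2))).map
          (fun k => (((p :: tail).map (·.2)).count k : Int) + 1) := by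
    rw [PySem.Dict.items_counter, List.map_map]
    simp [Function.comp_def]
  simp only [solution, solution_alt, hop, hmap]
  rw [List.map_cons, PySem.Set.ofList_cons, List.map_cons, pyReduceMul_eq_prod,
    bLoop_eq_prod (p :: tail).length _ le_rfl, List.map_cons, PySem.Set.ofList_cons,
    List.map_cons]

@[simp] theorem solution_raises : Claim_raises_solution := by
  unfold Claim_raises_solution
  refine ⟨fun c _ h => by simp [Raises_solution] at h; simp [Pre_solution, h], by decide, by decide, ?_⟩
  simp [solution_alt, pvRaiseWitness_solution, pvRaiseWitnessOut_solution, bLoop]
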